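-- pv_equiv track=rewrite | github.com/DaddyElonMusk69/agentic_terminal | backend/src/app/application/automation/prompt_request_builder.py | _select_primary_interval
-- ===== SOURCE A (Python) =====
-- from typing import List, Optional, Sequence
--
-- def _timeframe_minutes(timeframe: str) -> Optional[int]:
--     if not timeframe:
--         return None
--     value = timeframe.strip().lower()
--     if value.endswith("m") and value[:-1].isdigit():
--         return int(value[:-1])
--     if value.endswith("h") and value[:-1].isdigit():
--         return int(value[:-1]) * 60
--     if value.endswith("d") and value[:-1].isdigit():
--         return int(value[:-1]) * 1440
--     return None
--
-- def _select_primary_interval(intervals: Sequence[str]) -> str: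
--     best: Optional[str] = None
--     best_minutes: Optional[int] = None
--     for interval in intervals:
--         minutes = _timeframe_minutes(interval)
--         if minutes is None:
--             if best is None:
--                 best = interval
--             continue
--         if best_minutes is None or minutes > best_minutes:
--             best = interval
--             best_minutes = minutes
--     return best or ""
-- ===== SOURCE B (Python) =====
-- from typing import List, Optional, Sequence
--
-- def _timeframe_minutes(timeframe: str) -> Optional[int]:
--     if not timeframe:
--         return None
--     value = timeframe.strip().lower()
--     if value.endswith("m") and value[:-1].isdigit():
--         return int(value[:-1])
--     if value.endswith("h") and value[:-1].isdigit():
--         return int(value[:-1]) * 60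
--     if value.endswith("d") and value[:-1].isdigit():
--         return int(value[:-1]) * 1440
--     return None
--
-- def _select_primary_interval(intervals: Sequence[str]) -> str:
--     # Sort the valid (interval, minutes) pairs by minutes, largest first.
--     # Python's sort is stable, so among ties the first-seen interval stays first,
--     # matching the original's strict '>' update rule.
--     ranked = sorted(
--         ((iv, m) for iv in intervals if (m := _timeframe_minutes(iv)) is not None),
--         key=lambda p: p[1],
--         reverse=True,
--     )
--     if ranked:
--         return ranked[0][0]
--     return intervals[0] if intervals else ""
-- ===== Notes on version B (the rewrite author's own statement) =====
-- stated objective: alternative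
-- what changed: Replaces the single-pass running-maximum loop over two Optional accumulators with a sort-based selection: stable-sort the valid (interval, minutes) pairs by minutes in descending order and take the head (stability reproduces A's strict '>' tie-breaking), falling back to intervals[0] / ''.
import Mathlib
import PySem

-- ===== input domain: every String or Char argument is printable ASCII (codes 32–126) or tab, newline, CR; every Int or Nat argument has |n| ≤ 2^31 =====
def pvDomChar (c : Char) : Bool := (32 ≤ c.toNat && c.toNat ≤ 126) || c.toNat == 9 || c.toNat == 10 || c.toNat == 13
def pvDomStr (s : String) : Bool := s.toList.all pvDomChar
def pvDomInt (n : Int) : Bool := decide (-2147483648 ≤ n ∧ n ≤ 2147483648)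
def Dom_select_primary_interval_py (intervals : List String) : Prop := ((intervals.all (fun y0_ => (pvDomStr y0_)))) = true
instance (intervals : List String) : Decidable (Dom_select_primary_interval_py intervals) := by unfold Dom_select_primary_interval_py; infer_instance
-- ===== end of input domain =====

-- B replaces A's single-pass running-maximum loop (two Optional accumulators) with a
-- sort-based selection: stable-sort the valid (interval, minutes) pairs descending by
-- minutes and take the head; same result, a genuinely different algorithm (not faster).

-- ===== PORT A =====
-- shared helper: port of _timeframe_minutes (used by both Python versions verbatim)
def timeframe_minutes (timeframe : String) : Option Int :=
  if timeframe = "" then none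
  else
    let value := PySem.Str.lower (PySem.Str.strip timeframe)
    if PySem.Str.endswith value "m" && PySem.Str.strIsdigit (PySem.Str.slice value none (some (-1))) then
      PySem.Int.ofStr? (PySem.Str.slice value none (some (-1)))   -- int() cannot fail after isdigit
    else if PySem.Str.endswith value "h" && PySem.Str.strIsdigit (PySem.Str.slice value none (some (-1))) then
      (PySem.Int.ofStr? (PySem.Str.slice value none (some (-1)))).map (· * 60)
    else if PySem.Str.endswith value "d" && PySem.Str.strIsdigit (PySem.Str.slice value none (some (-1))) then
      (PySem.Int.ofStr? (PySem.Str.slice value none (some (-1)))).map (· * 1440)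
    else none

-- A's loop body: state = (best, best_minutes)
def spiStep (s : Option String × Option Int) (interval : String) : Option String × Option Int :=
  match timeframe_minutes interval with
  | none =>
      match s.1 with
      | none => (some interval, s.2)
      | some _ => s
  | some m =>
      match s.2 with
      | none => (some interval, some m)
      | some bm => if m > bm then (some interval, some m) else s

def select_primary_interval_py (intervals : List String) : String :=
  let st := intervals.foldl spiStep (none, none)
  match st.1 with
  | none => ""        -- best or "" : best is None only for the empty list
  | some b => b       -- ("" or "") = "" = b when b is empty, so returning b is exact

-- ===== PORT B =====
def select_primary_interval_py_alt (intervals : List String) : String :=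
  -- sorted(((iv, m) for iv in intervals if (m := _timeframe_minutes(iv)) is not None),
  --        key=lambda p: p[1], reverse=True) : PySem.List.sorted is Python's stable sort
  let ranked := PySem.List.sorted
      (intervals.filterMap (fun iv => (timeframe_minutes iv).map (fun m => (iv, m))))
      (fun p => p.2) true
  match ranked with
  | p :: _ => p.1
  | [] => match intervals with
          | [] => ""
          | x :: _ => x

-- ===== PRECONDITION & SPEC =====
def Spec_select_primary_interval_py (intervals : List String) (out : String) : Prop := out = select_primary_interval_py_alt intervals
instance (intervals : List String) (out : String) : Decidable (Spec_select_primary_interval_py intervals out) := by unfold Spec_select_primary_interval_py; infer_instance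

-- ===== CLAIM =====
def Claim_equal_select_primary_interval_py : Prop := ∀ (intervals : List String), Dom_select_primary_interval_py intervals → Spec_select_primary_interval_py intervals (select_primary_interval_py intervals)

-- ===== LEMMAS AND PROOFS =====

-- first-maximum step (matches the head movement of descending stable insertion)
def spiMaxStep (acc p : String × Int) : String × Int :=
  if acc.2 < p.2 then p else acc

-- the list of valid (interval, minutes) pairs
def spiValid (xs : List String) : List (String × Int) :=
  xs.filterMap (fun iv => (timeframe_minutes iv).map (fun m => (iv, m)))

theorem spiValid_append (xs ys : List String) : spiValid (xs ++ ys) = spiValid xs ++ spiValid ys := by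
  simp [spiValid]

-- invariant: A's loop state is determined by the head of the list and the valid pairs
theorem spiState (xs : List String) :
    xs.foldl spiStep (none, none) =
      (match spiValid xs with
       | [] => ((xs.head?, none) : Option String × Option Int)
       | v :: vs => (some (vs.foldl spiMaxStep v).1, some (vs.foldl spiMaxStep v).2)) := by
  induction xs using List.reverseRecOn with
  | nil => simp [spiValid]
  | append_singleton ys y ih =>
    rw [List.foldl_append, ih, spiValid_append]
    rcases hv : spiValid ys with _ | ⟨v, vs⟩
    · rcases hy : timeframe_minutes y with _ | m
      · cases ys with
        | nil => simp_all [spiStep, spiValid]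
        | cons z zs => simp_all [spiStep, spiValid]
      · simp [spiStep, hy, spiValid]
    · rcases hy : timeframe_minutes y with _ | m
      · simp [spiStep, hy, spiValid]
      · simp only [spiStep, hy, spiValid, List.filterMap_cons, List.filterMap_nil,
          Option.map_some, List.cons_append, List.foldl_append, List.foldl_cons,
          List.foldl_nil, spiMaxStep]
        split_ifs with h
        · simp
        · simp

-- head of the descending stable insertion fold = running first-maximum
theorem spiInsHead (vs : List (String × Int)) (a : String × Int) (rest : List (String × Int)) :
    (vs.foldl (fun acc x => PySem.List.insertBy (fun p q => decide (q.2 < p.2)) x acc) (a :: rest)).head?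
      = some (vs.foldl spiMaxStep a) := by
  induction vs generalizing a rest with
  | nil => rfl
  | cons x vs ih =>
    simp only [List.foldl_cons]
    by_cases h : a.2 < x.2
    · rw [show PySem.List.insertBy (fun p q => decide (q.2 < p.2)) x (a :: rest)
            = x :: a :: rest from by simp [PySem.List.insertBy, h]]
      rw [ih x (a :: rest)]
      simp [spiMaxStep, h]
    · rw [show PySem.List.insertBy (fun p q => decide (q.2 < p.2)) x (a :: rest)
            = a :: PySem.List.insertBy (fun p q => decide (q.2 < p.2)) x rest from by
              simp [PySem.List.insertBy, h]]
      rw [ih a _]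
      simp [spiMaxStep, h]

-- head of the stable descending sort of a nonempty list is the first maximal element
theorem spiSortedHead (v : String × Int) (vs : List (String × Int)) :
    (PySem.List.sorted (v :: vs) (fun p => p.2) true).head? = some (vs.foldl spiMaxStep v) := by
  rw [PySem.List.sorted_rev_eq_foldl_insertBy]
  simpa [PySem.List.insertBy] using spiInsHead vs v []

-- ===== VERDICT =====
theorem select_primary_interval_py_spec : Claim_equal_select_primary_interval_py := by
  intro intervals _
  unfold Spec_select_primary_interval_py select_primary_interval_py select_primary_interval_py_alt
  rw [spiState]
  rw [show (intervals.filterMap (fun iv => (timeframe_minutes iv).map (fun m => (iv, m))))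
        = spiValid intervals from rfl]
  rcases hv : spiValid intervals with _ | ⟨v, vs⟩
  · rw [show PySem.List.sorted ([] : List (String × Int)) (fun p => p.2) true = [] from
      (PySem.List.sorted_eq_nil_iff _ _ _).mpr rfl]
    cases intervals with
    | nil => rfl
    | cons x xs => rfl
  · have h := spiSortedHead v vs
    rcases hs : PySem.List.sorted (v :: vs) (fun p => p.2) true with _ | ⟨p, t⟩
    · exact absurd ((PySem.List.sorted_eq_nil_iff _ _ _).mp hs) (by simp)
    · rw [hs] at h
      simp only [List.head?_cons, Option.some.injEq] at h
      simp [h]
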